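-- pv_equiv track=rewrite | github.com/IFM-UPIICSA/Metodos-Numericos | Proyecto/method_estadistico.py | Calc_Tabla_Totales
-- ===== SOURCE A (Python) =====
-- def Calc_Tabla_Totales(tabla_completa, grade, num_datos):
--     grade = grade-1
--     tabla_totales = []
--     tam = ((2)+ ( (grade*2) -3 ) + (grade - 1) )
--     for i in range (0, tam):
--         temp_dato = 0
--         for j in range (0, num_datos):
--             temp_dato += tabla_completa[j][i]
--         tabla_totales.append(temp_dato)
--     return tabla_totales
-- ===== SOURCE B (Python) =====
-- def Calc_Tabla_Totales(tabla_completa, grade, num_datos):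
--     tam = 3 * grade - 5
--     if tam <= 0:
--         return []
--     totales = [0] * tam
--     for j in range(num_datos):
--         fila = tabla_completa[j]
--         for i in range(tam):
--             totales[i] += fila[i]
--     return totales
-- ===== Notes on version B (the rewrite author's own statement) =====
-- stated objective: alternative
-- what changed: Replaces A's column-major nested loops (each column total recomputed from scratch by an inner scan over rows, appended one by one) with a preallocated [0]*tam accumulator updated row-major, maintaining all column running totals simultaneously in one pass over the rows.
import Mathlib
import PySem

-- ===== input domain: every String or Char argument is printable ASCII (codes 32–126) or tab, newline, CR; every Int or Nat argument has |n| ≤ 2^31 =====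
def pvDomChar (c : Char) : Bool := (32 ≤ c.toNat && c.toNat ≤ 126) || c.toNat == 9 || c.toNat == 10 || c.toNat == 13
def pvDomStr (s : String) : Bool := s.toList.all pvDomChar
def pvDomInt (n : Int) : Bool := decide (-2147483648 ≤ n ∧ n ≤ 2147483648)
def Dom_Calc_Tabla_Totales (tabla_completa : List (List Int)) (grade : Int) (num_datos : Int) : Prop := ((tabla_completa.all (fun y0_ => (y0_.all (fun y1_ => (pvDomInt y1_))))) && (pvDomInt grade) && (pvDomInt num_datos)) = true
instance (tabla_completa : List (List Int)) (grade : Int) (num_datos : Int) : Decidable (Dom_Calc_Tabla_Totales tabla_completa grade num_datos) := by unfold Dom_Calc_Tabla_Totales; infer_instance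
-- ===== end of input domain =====

-- B replaces A's column-major nested loops by a preallocated accumulator array updated row-major
-- (one running total per column maintained simultaneously); objective: alternative decomposition, same cost.

-- ===== PORT A =====
-- Column-major: for each column i, recompute its total from scratch over rows j, then append it.
def Calc_Tabla_Totales (tabla_completa : List (List Int)) (grade : Int) (num_datos : Int) : List Int :=
  let grade := grade - 1
  let tam : Int := 2 + (grade * 2 - 3) + (grade - 1)
  (PySem.List.pyRange 0 tam 1).foldl
    (fun tabla_totales i =>
      tabla_totales ++
        [(PySem.List.pyRange 0 num_datos 1).foldl
          (fun temp_dato j =>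
            temp_dato + PySem.List.pyGetD (PySem.List.pyGetD tabla_completa j []) i 0) 0])
    []

-- ===== PORT B =====
-- Row-major: preallocate [0]*tam, then add each row elementwise into the accumulator.
def Calc_Tabla_Totales_alt (tabla_completa : List (List Int)) (grade : Int) (num_datos : Int) : List Int :=
  let tam : Int := 3 * grade - 5
  if tam ≤ 0 then []
  else
    (PySem.List.pyRange 0 num_datos 1).foldl
      (fun totales j =>
        let fila := PySem.List.pyGetD tabla_completa j []
        (PySem.List.pyRange 0 tam 1).foldl
          (fun ts i =>
            PySem.List.pySetD ts i (PySem.List.pyGetD ts i 0 + PySem.List.pyGetD fila i 0))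
          totales)
      (List.replicate tam.toNat 0)

-- ===== PRECONDITION & SPEC =====
-- Pre_ excludes exactly the inputs where Python A raises IndexError: when the number of columns
-- tam = 3*grade-5 is positive and num_datos is positive, A indexes tabla_completa[j][i] for all
-- j < num_datos, i < tam, so it needs num_datos ≤ len(tabla_completa) and every accessed row of length ≥ tam.
def Pre_Calc_Tabla_Totales (tabla_completa : List (List Int)) (grade : Int) (num_datos : Int) : Prop :=
  3 * grade - 5 ≤ 0 ∨ num_datos ≤ 0 ∨
    (num_datos ≤ (tabla_completa.length : Int) ∧
      ∀ row ∈ tabla_completa.take num_datos.toNat, 3 * grade - 5 ≤ (row.length : Int))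
instance (tabla_completa : List (List Int)) (grade : Int) (num_datos : Int) : Decidable (Pre_Calc_Tabla_Totales tabla_completa grade num_datos) := by unfold Pre_Calc_Tabla_Totales; infer_instance

def pvWitness_Calc_Tabla_Totales : List (List Int) × Int × Int := ([[1, 2, 3, 4], [5, 6, 7, 8]], 3, 2)

def Spec_Calc_Tabla_Totales (tabla_completa : List (List Int)) (grade : Int) (num_datos : Int) (out : List Int) : Prop := out = Calc_Tabla_Totales_alt tabla_completa grade num_datos
instance (tabla_completa : List (List Int)) (grade : Int) (num_datos : Int) (out : List Int) : Decidable (Spec_Calc_Tabla_Totales tabla_completa grade num_datos out) := by unfold Spec_Calc_Tabla_Totales; infer_instance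

-- ===== CLAIM (what is proved, stated in full; the proofs are below) =====
def Claim_equal_Calc_Tabla_Totales : Prop := ∀ (tabla_completa : List (List Int)) (grade : Int) (num_datos : Int), Dom_Calc_Tabla_Totales tabla_completa grade num_datos → Pre_Calc_Tabla_Totales tabla_completa grade num_datos → Spec_Calc_Tabla_Totales tabla_completa grade num_datos (Calc_Tabla_Totales tabla_completa grade num_datos)

-- ===== LEMMAS AND PROOFS =====

-- the value A and B both add for row j, column i
def pvCol (t : List (List Int)) (j i : Int) : Int :=
  PySem.List.pyGetD (PySem.List.pyGetD t j []) i 0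

-- A's outer loop is a map: append-in-a-fold
lemma pv_foldl_push {α β : Type} (g : α → β) :
    ∀ (l : List α) (acc : List β), l.foldl (fun a x => a ++ [g x]) acc = acc ++ l.map g := by
  intro l
  induction l with
  | nil => simp
  | cons x xs ih => intro acc; simp [List.foldl_cons, ih]

-- A's inner loop is a sum
lemma pv_foldl_add_sum (f : Int → Int) :
    ∀ (l : List Int) (s0 : Int), l.foldl (fun s j => s + f j) s0 = s0 + (l.map f).sum := by
  intro l
  induction l with
  | nil => simp
  | cons x xs ih => intro s0; simp [List.foldl_cons, ih]; ring

-- B's inner loop: elementwise update of the first m entries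
lemma pv_inner_eq (f : Int → Int) :
    ∀ (m : Nat) (ts : List Int), m ≤ ts.length →
      (PySem.List.pyRange 0 (m : Int) 1).foldl
        (fun ts i => PySem.List.pySetD ts i (PySem.List.pyGetD ts i 0 + f i)) ts
      = ts.mapIdx (fun k v => if k < m then v + f k else v) := by
  intro m
  induction m with
  | zero =>
      intro ts _
      rw [PySem.List.pyRange_one_eq_nil (by norm_num)]
      apply List.ext_getElem <;> simp [List.getElem_mapIdx]
  | succ m ih =>
      intro ts hm
      have h1 : ((m : Int) + 1 : Int) = ((m + 1 : Nat) : Int) := by push_cast; ring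
      rw [← h1, PySem.List.pyRange_one_succ_right (by positivity), List.foldl_append,
        ih ts (by omega)]
      set R := ts.mapIdx (fun k v => if k < m then v + f k else v) with hR
      have hRlen : R.length = ts.length := by simp [hR]
      have hmR : m < R.length := by omega
      simp only [List.foldl_cons, List.foldl_nil]
      rw [PySem.List.pySetD_natCast, PySem.List.pyGetD_natCast]
      have hget : R.getD m 0 = ts[m]'(by omega) := by
        rw [List.getD_eq_getElem R 0 hmR]
        simp [hR, List.getElem_mapIdx]
      rw [hget]
      apply List.ext_getElem
      · simp [hR]
      · intro k hk1 hk2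
        by_cases hkm : k = m
        · subst hkm
          simp [List.getElem_mapIdx]
        · rw [List.getElem_set_ne (by omega)]
          simp only [hR, List.getElem_mapIdx]
          have hk : k < ts.length := by simp [hR] at hk1; omega
          by_cases h : k < m
          · simp [h, show k < m + 1 by omega]
          · simp [h, show ¬ (k < m + 1) by omega]

-- B's outer loop: every column total accumulated simultaneously
lemma pv_outer_eq (t : List (List Int)) (tam : Int) :
    ∀ (L : List Int) (ts : List Int), (ts.length : Int) = tam →
      L.foldl
        (fun totales j =>
          let fila := PySem.List.pyGetD t j []
          (PySem.List.pyRange 0 tam 1).foldl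
            (fun ts i =>
              PySem.List.pySetD ts i (PySem.List.pyGetD ts i 0 + PySem.List.pyGetD fila i 0))
            totales) ts
      = ts.mapIdx (fun k v => v + (L.map (fun j => pvCol t j k)).sum) := by
  intro L
  induction L with
  | nil =>
      intro ts _
      apply List.ext_getElem <;> simp [List.getElem_mapIdx]
  | cons j L ih =>
      intro ts hts
      simp only [List.foldl_cons]
      have hrange : tam = ((ts.length : Nat) : Int) := by omega
      rw [hrange, pv_inner_eq (fun i => PySem.List.pyGetD (PySem.List.pyGetD t j []) i 0)
        ts.length ts (le_refl _)]
      set R := ts.mapIdx (fun k v => if k < ts.length then v + PySem.List.pyGetD (PySem.List.pyGetD t j []) k 0 else v) with hRdef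
      have hRlen : R.length = ts.length := by simp [hRdef]
      rw [← hrange, ih R (by omega)]
      apply List.ext_getElem
      · simp [hRdef]
      · intro k hk1 hk2
        have hk : k < ts.length := by simp [hRdef] at hk1; omega
        simp [hRdef, List.getElem_mapIdx, hk, pvCol]
        ring

-- main equality, unconditional on the ports
lemma pv_main (t : List (List Int)) (g n : Int) :
    Calc_Tabla_Totales t g n = Calc_Tabla_Totales_alt t g n := by
  unfold Calc_Tabla_Totales Calc_Tabla_Totales_alt
  have htam : 2 + ((g - 1) * 2 - 3) + ((g - 1) - 1) = 3 * g - 5 := by ring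
  simp only [htam]
  by_cases h : 3 * g - 5 ≤ 0
  · rw [if_pos h,
      show PySem.List.pyRange 0 (3 * g - 5) 1 = [] from PySem.List.pyRange_one_eq_nil (by omega)]
    simp
  · rw [if_neg h]
    have hlen : ((List.replicate (3 * g - 5).toNat (0 : Int)).length : Int) = 3 * g - 5 := by
      rw [List.length_replicate]; omega
    rw [pv_outer_eq t (3 * g - 5) (PySem.List.pyRange 0 n 1) (List.replicate (3 * g - 5).toNat 0) hlen]
    rw [pv_foldl_push]
    apply List.ext_getElem
    · simp [PySem.List.length_pyRange_one]
    · intro k hk1 hk2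
      have hk : k < (3 * g - 5).toNat := by
        simpa [PySem.List.length_pyRange_one] using hk1
      simp only [List.nil_append, List.getElem_map, List.getElem_mapIdx,
        PySem.List.getElem_pyRange_one, List.getElem_replicate]
      rw [pv_foldl_add_sum]
      simp [pvCol]

-- ===== VERDICT (by name: the statement is the Claim_ definition above) =====
theorem Calc_Tabla_Totales_spec : Claim_equal_Calc_Tabla_Totales := by
  intro t g n _ _
  unfold Spec_Calc_Tabla_Totales
  exact pv_main t g n
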